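-- pv_equiv track=rewrite | github.com/dokipen/trac | trac/wiki/api.py | _resolve_relative_name
-- ===== SOURCE A (Python) =====
-- def _resolve_relative_name(pagename, referrer):
--     base = referrer.split('/')
--     components = pagename.split('/')
--     for i, comp in enumerate(components):
--         if comp == '..':
--             if base:
--                 base.pop()
--         elif comp and comp != '.':
--             base.extend(components[i:])
--             break
--     return '/'.join(base)
-- ===== SOURCE B (Python) =====
-- def _resolve_relative_name(pagename, referrer):
--     base = referrer.split('/')
--     components = pagename.split('/')
--     first = next((i for i, c in enumerate(components)
--                   if c and c not in ('.', '..')), None)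
--     prefix = components if first is None else components[:first]
--     k = prefix.count('..')
--     kept = base[:max(0, len(base) - k)]
--     tail = [] if first is None else components[first:]
--     return '/'.join(kept + tail)
-- ===== Notes on version B (the rewrite author's own statement) =====
-- stated objective: alternative
-- what changed: A's in-place pop/extend/break mutation loop over base is replaced by a non-mutating measure-then-slice formulation: find the index of the first real component, count the '..' in the prefix before it, truncate base once with a slice, and append the untouched tail.
import Mathlib
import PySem

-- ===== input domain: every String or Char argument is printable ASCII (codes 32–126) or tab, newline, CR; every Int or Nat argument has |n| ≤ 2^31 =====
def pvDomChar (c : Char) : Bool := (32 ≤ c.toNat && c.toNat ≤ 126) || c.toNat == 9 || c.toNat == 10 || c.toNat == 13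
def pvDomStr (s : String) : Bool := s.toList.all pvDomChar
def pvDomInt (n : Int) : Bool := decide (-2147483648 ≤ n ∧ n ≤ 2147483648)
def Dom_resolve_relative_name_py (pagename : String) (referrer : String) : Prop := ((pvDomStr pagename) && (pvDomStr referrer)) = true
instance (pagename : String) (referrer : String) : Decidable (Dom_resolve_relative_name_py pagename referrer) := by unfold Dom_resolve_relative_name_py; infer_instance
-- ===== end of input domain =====

-- B replaces A's mutating pop/extend/break loop by a measure-then-slice formulation:
-- find the first real component, count the leading '..', truncate base once and append the tail (objective: simpler decomposition, same cost).

-- s.split('/'): the separator "/" is a nonempty literal, so PySem.Str.split? is always `some`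
def pvSplitSlash (s : String) : List String := (PySem.Str.split? s "/").getD []

-- ===== PORT A =====
-- the for-loop of A: state is the mutable list `base`; '..' pops (guarded by `if base:`),
-- a real component extends with components[i:] and breaks, '' and '.' are skipped
def pvALoop : List String → List String → List String
  | base, [] => base
  | base, c :: rest =>
    if c = ".." then
      pvALoop (if base = [] then base else base.dropLast) rest
    else if c ≠ "" ∧ c ≠ "." then
      base ++ (c :: rest)
    else
      pvALoop base rest

def resolve_relative_name_py (pagename : String) (referrer : String) : String :=
  PySem.Str.join "/" (pvALoop (pvSplitSlash referrer) (pvSplitSlash pagename))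

-- ===== PORT B =====
def pvIsReal (c : String) : Bool := !(c == "" || c == "." || c == "..")

def resolve_relative_name_py_alt (pagename : String) (referrer : String) : String :=
  let base := pvSplitSlash referrer
  let components := pvSplitSlash pagename
  match components.findIdx? pvIsReal with
  | none =>
      PySem.Str.join "/" (base.take (base.length - components.count ".."))
  | some i =>
      PySem.Str.join "/" (base.take (base.length - (components.take i).count "..") ++ components.drop i)

-- ===== PRECONDITION & SPEC =====
def Spec_resolve_relative_name_py (pagename : String) (referrer : String) (out : String) : Prop := out = resolve_relative_name_py_alt pagename referrer
instance (pagename : String) (referrer : String) (out : String) : Decidable (Spec_resolve_relative_name_py pagename referrer out) := by unfold Spec_resolve_relative_name_py; infer_instance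

-- ===== CLAIM (what is proved, stated in full; the proofs are below) =====
def Claim_equal_resolve_relative_name_py : Prop := ∀ (pagename : String) (referrer : String), Dom_resolve_relative_name_py pagename referrer → Spec_resolve_relative_name_py pagename referrer (resolve_relative_name_py pagename referrer)

-- ===== LEMMAS AND PROOFS =====

-- one guarded pop followed by a truncation-by-k is a truncation-by-(k+1)
theorem pvPopTake (base : List String) (k : Nat) :
    (if base = [] then base else base.dropLast).take
      ((if base = [] then base else base.dropLast).length - k)
    = base.take (base.length - (k + 1)) := by
  by_cases hb : base = []
  · subst hb; simp
  · rw [if_neg hb, List.dropLast_eq_take, List.length_take, List.take_take]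
    congr 1
    have : 0 < base.length := List.length_pos_iff.mpr hb
    omega

-- A's loop computes exactly B's truncate-and-append value, for every state of `base`
theorem pvALoop_eq (cs : List String) : ∀ base : List String,
    pvALoop base cs =
      match cs.findIdx? pvIsReal with
      | none => base.take (base.length - cs.count "..")
      | some i => base.take (base.length - (cs.take i).count "..") ++ cs.drop i := by
  induction cs with
  | nil => intro base; simp [pvALoop]
  | cons c rest ih =>
    intro base
    by_cases hdd : c = ".."
    · subst hdd
      have hreal : pvIsReal ".." = false := by decide
      rw [pvALoop, if_pos rfl, ih, List.findIdx?_cons, hreal]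
      simp only [Bool.false_eq_true, if_false]
      cases hfind : rest.findIdx? pvIsReal with
      | none =>
        simp only [Option.map_none, List.count_cons, beq_self_eq_true, if_true]
        exact pvPopTake base (rest.count "..")
      | some j =>
        simp only [Option.map_some, List.take_succ_cons, List.drop_succ_cons,
          List.count_cons, beq_self_eq_true, if_true]
        rw [pvPopTake base ((rest.take j).count "..")]
    · by_cases hskip : c = "" ∨ c = "."
      · have hreal : pvIsReal c = false := by
          rcases hskip with h | h <;> subst h <;> decide
        rw [pvALoop, if_neg hdd, if_neg (by tauto), ih, List.findIdx?_cons, hreal]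
        simp only [Bool.false_eq_true, if_false]
        cases hfind : rest.findIdx? pvIsReal with
        | none => simp [hdd]
        | some j =>
          simp [hdd, List.take_succ_cons, List.drop_succ_cons]
      · rw [not_or] at hskip
        have hreal : pvIsReal c = true := by
          simp [pvIsReal, hskip.1, hskip.2, hdd]
        rw [pvALoop, if_neg hdd, if_pos ⟨hskip.1, hskip.2⟩, List.findIdx?_cons, hreal]
        simp

-- ===== VERDICT (by name: the statement is the Claim_ definition above) =====
theorem resolve_relative_name_py_spec : Claim_equal_resolve_relative_name_py := by
  intro pagename referrer _
  unfold Spec_resolve_relative_name_py resolve_relative_name_py resolve_relative_name_py_alt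
  rw [pvALoop_eq]
  cases hfind : List.findIdx? pvIsReal (pvSplitSlash pagename) <;> simp only [hfind]
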